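-- pv_equiv track=rewrite | github.com/Exahilosys/survey | survey/bases.py | _rmsr
-- ===== SOURCE A (Python) =====
-- def _rmsr(buffers, xsize):
--
--     ysize = 0
--     nsize = xsize
--     for buffer in buffers:
--         nsize -= len(buffer) + 1
--         if nsize < 0:
--             break
--         xsize = nsize
--         ysize += 1
--
--     return (ysize, xsize)
-- ===== SOURCE B (Python) =====
-- from itertools import accumulate, takewhile
--
--
-- def _rmsr(buffers, xsize):
--     prefix = list(accumulate(len(b) + 1 for b in buffers))
--     fits = list(takewhile(lambda p: p <= xsize, prefix))
--     ysize = len(fits)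
--     if ysize == 0:
--         return (ysize, xsize)
--     return (ysize, xsize - fits[-1])
-- ===== Notes on version B (the rewrite author's own statement) =====
-- stated objective: alternative
-- what changed: Replaces the stateful early-break running subtraction with a prefix-sum table (itertools.accumulate) scanned by takewhile: the count is the length of the <=-xsize prefix and the remainder is xsize minus the last fitting cumulative cost.
import Mathlib
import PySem

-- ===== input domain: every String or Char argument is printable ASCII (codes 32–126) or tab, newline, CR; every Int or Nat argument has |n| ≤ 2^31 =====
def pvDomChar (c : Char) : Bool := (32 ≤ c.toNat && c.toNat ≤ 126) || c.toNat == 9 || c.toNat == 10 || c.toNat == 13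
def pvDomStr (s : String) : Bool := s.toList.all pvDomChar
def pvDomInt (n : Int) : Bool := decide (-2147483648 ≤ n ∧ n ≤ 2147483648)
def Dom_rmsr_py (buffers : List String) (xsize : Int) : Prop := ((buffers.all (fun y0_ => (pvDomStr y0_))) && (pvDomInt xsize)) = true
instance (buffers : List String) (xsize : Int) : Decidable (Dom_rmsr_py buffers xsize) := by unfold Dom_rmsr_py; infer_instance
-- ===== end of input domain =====

-- B replaces A's stateful early-break running subtraction by a prefix-sum table scanned
-- with takeWhile (objective: alternative decomposition, same O(n) cost).

-- ===== PORT A =====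
-- loop state: (ysize, nsize, xsize) exactly as in the Python for-loop with break
def rmsrLoop : List String → Int → Int → Int → Int × Int
  | [], ysize, _, xsize => (ysize, xsize)
  | b :: rest, ysize, nsize, xsize =>
      let nsize' := nsize - (PySem.Str.len b + 1)
      if nsize' < 0 then (ysize, xsize)
      else rmsrLoop rest (ysize + 1) nsize' nsize'

def rmsr_py (buffers : List String) (xsize : Int) : Int × Int :=
  rmsrLoop buffers 0 xsize xsize

-- ===== PORT B =====
-- itertools.accumulate over the per-buffer costs, starting total `acc`
def pvAccum : List Int → Int → List Int
  | [], _ => []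
  | c :: cs, acc => (acc + c) :: pvAccum cs (acc + c)

def rmsr_py_alt (buffers : List String) (xsize : Int) : Int × Int :=
  let pref := pvAccum (buffers.map (fun b => PySem.Str.len b + 1)) 0
  let fits := pref.takeWhile (fun p => decide (p ≤ xsize))
  let ysize : Int := fits.length
  if ysize = 0 then (ysize, xsize)
  else (ysize, xsize - fits.getLast!)

-- ===== PRECONDITION & SPEC =====
def Spec_rmsr_py (buffers : List String) (xsize : Int) (out : Int × Int) : Prop := out = rmsr_py_alt buffers xsize
instance (buffers : List String) (xsize : Int) (out : Int × Int) : Decidable (Spec_rmsr_py buffers xsize out) := by unfold Spec_rmsr_py; infer_instance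

-- ===== CLAIM (what is proved, stated in full; the proofs are below) =====
def Claim_equal_rmsr_py : Prop := ∀ (buffers : List String) (xsize : Int), Dom_rmsr_py buffers xsize → Spec_rmsr_py buffers xsize (rmsr_py buffers xsize)

-- ===== LEMMAS AND PROOFS =====

theorem pvAccum_add (cs : List Int) (a b : Int) :
    pvAccum cs (a + b) = (pvAccum cs b).map (fun x => a + x) := by
  induction cs generalizing b with
  | nil => simp [pvAccum]
  | cons c cs ih =>
      simp only [pvAccum, List.map_cons]
      rw [show a + b + c = a + (b + c) from by ring, ih (b + c)]

theorem takeWhile_map_add (l : List Int) (c n : Int) :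
    (l.map (fun x => c + x)).takeWhile (fun p => decide (p ≤ n))
      = (l.takeWhile (fun p => decide (p ≤ n - c))).map (fun x => c + x) := by
  induction l with
  | nil => simp
  | cons q l ih =>
      simp only [List.map_cons, List.takeWhile_cons]
      by_cases h : q ≤ n - c
      · have h' : c + q ≤ n := by omega
        simp [h, h', ih]
      · have h' : ¬ c + q ≤ n := by omega
        simp [h, h']

theorem getLast!_cons_if (x : Int) (l : List Int) :
    (x :: l).getLast! = if l.isEmpty then x else l.getLast! := by
  cases l <;> simp [List.getLast!]

theorem getLast!_cons_map (Q : List Int) (c a : Int) :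
    (a :: Q.map (fun x => c + x)).getLast! = if Q.isEmpty then a else c + Q.getLast! := by
  induction Q generalizing a with
  | nil => simp [List.getLast!]
  | cons q qs ih =>
      rw [List.map_cons, getLast!_cons_if, ih, getLast!_cons_if]
      by_cases h : qs.isEmpty <;> simp [h]

theorem rmsrLoop_alt (bs : List String) (y n : Int) :
    rmsrLoop bs y n n = (y + (rmsr_py_alt bs n).1, (rmsr_py_alt bs n).2) := by
  induction bs generalizing y n with
  | nil => simp [rmsrLoop, rmsr_py_alt, pvAccum]
  | cons b rest ih =>
      set c : Int := PySem.Str.len b + 1 with hc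
      have haccum : pvAccum ((b :: rest).map (fun s => PySem.Str.len s + 1)) 0
          = c :: (pvAccum (rest.map (fun s => PySem.Str.len s + 1)) 0).map (fun x => c + x) := by
        simp only [List.map_cons, pvAccum, zero_add]
        congr 1
        have := pvAccum_add (rest.map (fun s => PySem.Str.len s + 1)) c 0
        simpa using this
      set P := pvAccum (rest.map (fun s => PySem.Str.len s + 1)) 0 with hP
      by_cases hlt : n - c < 0
      · -- first buffer does not fit: loop breaks, fits is empty
        have hcn : ¬ c ≤ n := by omega
        have hlhs : rmsrLoop (b :: rest) y n n = (y, n) := by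
          simp only [rmsrLoop]
          rw [if_pos hlt]
        rw [hlhs]
        simp only [rmsr_py_alt]
        rw [haccum, List.takeWhile_cons]
        have hdec : (decide (c ≤ n)) = false := by simp [hcn]
        rw [hdec]
        simp
      · -- first buffer fits
        have hcn : c ≤ n := by omega
        have hfits : (c :: P.map (fun x => c + x)).takeWhile (fun p => decide (p ≤ n))
            = c :: (P.takeWhile (fun p => decide (p ≤ n - c))).map (fun x => c + x) := by
          rw [List.takeWhile_cons]
          simp only [hcn, decide_true, if_true]
          rw [takeWhile_map_add]
        set Q := P.takeWhile (fun p => decide (p ≤ n - c)) with hQ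
        have hlhs : rmsrLoop (b :: rest) y n n = rmsrLoop rest (y + 1) (n - c) (n - c) := by
          simp only [rmsrLoop]
          rw [if_neg hlt]
        rw [hlhs, ih (y + 1) (n - c)]
        have halt1 : rmsr_py_alt (b :: rest) n =
            (((1 : Int) + Q.length),
              if Q.isEmpty then n - c else n - (c + Q.getLast!)) := by
          simp only [rmsr_py_alt, haccum, hfits]
          have hne : ¬ (((c :: Q.map (fun x => c + x)).length : Int) = 0) := by
            simp only [List.length_cons, List.length_map]
            omega
          rw [if_neg hne, getLast!_cons_map]
          simp only [Prod.mk.injEq]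
          constructor
          · simp only [List.length_cons, List.length_map]
            push_cast
            ring
          · split_ifs <;> rfl
        have halt2 : rmsr_py_alt rest (n - c) =
            ((Q.length : Int), if Q.isEmpty then n - c else (n - c) - Q.getLast!) := by
          simp only [rmsr_py_alt]
          rw [← hP, ← hQ]
          by_cases hQe : Q.isEmpty
          · simp [List.isEmpty_iff.mp hQe]
          · have hlen : ¬ ((Q.length : Int) = 0) := by
              intro h
              have hq : Q = [] := List.eq_nil_of_length_eq_zero (by exact_mod_cast h)
              exact hQe (by simp [hq])
            rw [if_neg hlen]
            simp [hQe]
        rw [halt1, halt2]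
        simp only [Prod.mk.injEq]
        refine ⟨by ring, by split_ifs <;> ring⟩

-- ===== VERDICT (by name: the statement is the Claim_ definition above) =====
theorem rmsr_py_spec : Claim_equal_rmsr_py := by
  intro buffers xsize _
  unfold Spec_rmsr_py rmsr_py
  rw [rmsrLoop_alt]
  simp
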